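-- pv_equiv track=rewrite | github.com/gcuijpers/MRI-scheduling | CRS2.py | performance_eval
-- ===== SOURCE A (Python) =====
-- def performance_eval(schedule, patients):
--     lateness = [] # hours scan starts later than scheduled
--     days_wait = [] # n. days in future patients are scheduled upon calling
--     overtime = [] # hours of overtime for each day (after 17:00)
--     idle_time = [] # machine idle time between 8-17 per day (except last day)
--     idle_time_curr = 0
--
--     curr_time = 8
--
--     for slot in schedule:
--         if slot[1] == 8 and slot[0] > 1: # first patient always scheduled at 8
--             overtime.append(max(0, curr_time - 17))
--             idle_time_curr += max(0, 17 - curr_time)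
--             idle_time.append(idle_time_curr)
--             idle_time_curr = 0
--
--             curr_time = 8
--
--         pat = patients[slot[2]]
--         lateness.append(max(0, curr_time - slot[1]))
--         idle_time_curr += max(0, slot[1] - curr_time) #starting time - prev. finish
--         days_wait.append(int(slot[0] - pat[0]))
--
--         curr_time = max(curr_time, slot[1]) + pat[2]
--
--     return lateness, days_wait, overtime, idle_time
-- ===== SOURCE B (Python) =====
-- # Different decomposition: split the schedule into day-segments first (recursively),
-- # then evaluate each segment independently from a fresh 8:00 clock, closing every
-- # segment except the last with its overtime/idle entries.
--
-- def _segments(schedule):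
--     # one split before every slot with slot[1]==8 and slot[0]>1; always >=1 segment
--     if not schedule:
--         return [[]]
--     slot = schedule[0]
--     rest = _segments(schedule[1:])
--     first = [slot] + rest[0]
--     if slot[1] == 8 and slot[0] > 1:
--         return [[]] + [first] + rest[1:]
--     return [first] + rest[1:]
--
-- def _eval_segment(seg, patients, curr=8, idle=0):
--     lat, dw = [], []
--     for slot in seg:
--         pat = patients[slot[2]]
--         lat.append(max(0, curr - slot[1]))
--         idle += max(0, slot[1] - curr)
--         dw.append(int(slot[0] - pat[0]))
--         curr = max(curr, slot[1]) + pat[2]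
--     return lat, dw, curr, idle
--
-- def performance_eval(schedule, patients):
--     segs = _segments(schedule)
--     lateness, days_wait, overtime, idle_time = [], [], [], []
--     for seg in segs[:-1]:
--         lat, dw, curr, idle = _eval_segment(seg, patients)
--         lateness += lat
--         days_wait += dw
--         overtime.append(max(0, curr - 17))
--         idle_time.append(idle + max(0, 17 - curr))
--     lat, dw, _, _ = _eval_segment(segs[-1], patients)
--     lateness += lat
--     days_wait += dw
--     return lateness, days_wait, overtime, idle_time
-- ===== Notes on version B (the rewrite author's own statement) =====
-- stated objective: alternative
-- what changed: B first partitions the schedule into day-segments (a recursive split before every slot with slot[1]==8 and slot[0]>1) and then evaluates each segment independently from a fresh 8:00 clock, closing every segment except the last; A interleaves the day-boundary bookkeeping inside one stateful pass.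
import Mathlib
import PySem

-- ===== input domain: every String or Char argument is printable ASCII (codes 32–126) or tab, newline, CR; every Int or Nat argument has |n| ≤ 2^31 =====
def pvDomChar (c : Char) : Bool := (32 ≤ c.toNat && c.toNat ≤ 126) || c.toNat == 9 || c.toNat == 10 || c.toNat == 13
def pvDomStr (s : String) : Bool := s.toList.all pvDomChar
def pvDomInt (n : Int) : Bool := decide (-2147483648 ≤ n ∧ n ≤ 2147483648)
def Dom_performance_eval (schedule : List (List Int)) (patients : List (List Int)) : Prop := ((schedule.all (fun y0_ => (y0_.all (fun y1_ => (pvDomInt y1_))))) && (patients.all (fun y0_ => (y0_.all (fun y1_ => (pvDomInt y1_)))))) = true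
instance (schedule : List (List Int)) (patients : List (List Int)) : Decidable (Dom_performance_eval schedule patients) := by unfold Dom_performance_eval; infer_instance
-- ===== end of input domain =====

-- B replaces A's single stateful pass by a partition-into-day-segments pass followed by
-- an independent per-segment evaluation (alternative decomposition, same cost).


-- ===== PORT A =====
-- A's loop body: state = (lateness, days_wait, overtime, idle_time, idle_time_curr, curr_time)
def pvStepA (patients : List (List Int))
    (st : List Int × List Int × List Int × List Int × Int × Int) (slot : List Int) :
    List Int × List Int × List Int × List Int × Int × Int :=
  let (lat, dw, ot, it, idlec, curr) := st
  let (ot, it, idlec, curr) :=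
    if PySem.List.pyGetD slot 1 0 = 8 ∧ PySem.List.pyGetD slot 0 0 > 1 then
      (ot ++ [max 0 (curr - 17)], it ++ [idlec + max 0 (17 - curr)], (0 : Int), (8 : Int))
    else (ot, it, idlec, curr)
  let pat := PySem.List.pyGetD patients (PySem.List.pyGetD slot 2 0) []
  (lat ++ [max 0 (curr - PySem.List.pyGetD slot 1 0)],
   dw ++ [PySem.List.pyGetD slot 0 0 - PySem.List.pyGetD pat 0 0],
   ot, it,
   idlec + max 0 (PySem.List.pyGetD slot 1 0 - curr),
   max curr (PySem.List.pyGetD slot 1 0) + PySem.List.pyGetD pat 2 0)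

def performance_eval (schedule : List (List Int)) (patients : List (List Int)) :
    List Int × List Int × List Int × List Int :=
  let (lat, dw, ot, it, _, _) := schedule.foldl (pvStepA patients) ([], [], [], [], 0, 8)
  (lat, dw, ot, it)

-- ===== PORT B =====
-- Source B `_segments`: one split before every slot with slot[1]==8 and slot[0]>1
def pvSegments : List (List Int) → List (List (List Int))
  | [] => [[]]
  | slot :: xs =>
    match pvSegments xs with
    | [] => []  -- unreachable: pvSegments never returns []
    | h :: t =>
      let first := slot :: h
      if PySem.List.pyGetD slot 1 0 = 8 ∧ PySem.List.pyGetD slot 0 0 > 1 then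
        [] :: first :: t
      else first :: t

-- Source B `_eval_segment` loop body: state = (lat, dw, curr, idle)
def pvStepSeg (patients : List (List Int))
    (st : List Int × List Int × Int × Int) (slot : List Int) :
    List Int × List Int × Int × Int :=
  let (lat, dw, curr, idle) := st
  let pat := PySem.List.pyGetD patients (PySem.List.pyGetD slot 2 0) []
  (lat ++ [max 0 (curr - PySem.List.pyGetD slot 1 0)],
   dw ++ [PySem.List.pyGetD slot 0 0 - PySem.List.pyGetD pat 0 0],
   max curr (PySem.List.pyGetD slot 1 0) + PySem.List.pyGetD pat 2 0,
   idle + max 0 (PySem.List.pyGetD slot 1 0 - curr))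

def pvEvalSeg (patients : List (List Int)) (seg : List (List Int)) :
    List Int × List Int × Int × Int :=
  seg.foldl (pvStepSeg patients) ([], [], 8, 0)

-- Source B main loop over segments: every segment but the last is closed with overtime/idle
def pvProcSegs (patients : List (List Int)) :
    List (List (List Int)) → List Int × List Int × List Int × List Int
  | [] => ([], [], [], [])  -- unreachable: pvSegments never returns []
  | [seg] =>
    let (lat, dw, _, _) := pvEvalSeg patients seg
    (lat, dw, [], [])
  | seg :: rest =>
    let (lat, dw, curr, idle) := pvEvalSeg patients seg
    let (lat2, dw2, ot, it) := pvProcSegs patients rest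
    (lat ++ lat2, dw ++ dw2, max 0 (curr - 17) :: ot, (idle + max 0 (17 - curr)) :: it)

def performance_eval_alt (schedule : List (List Int)) (patients : List (List Int)) :
    List Int × List Int × List Int × List Int :=
  pvProcSegs patients (pvSegments schedule)

-- ===== PRECONDITION & SPEC =====
-- Pre_: exactly the inputs on which the Python A returns (each slot has the three used
-- fields, slot[2] is a valid (possibly negative) index into patients, and that patient
-- record has the two used fields); outside it A raises IndexError.
def Pre_performance_eval (schedule : List (List Int)) (patients : List (List Int)) : Prop :=
  ∀ slot ∈ schedule, 3 ≤ slot.length ∧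
    PySem.Raise.InRange patients.length (slot.getD 2 0) ∧
    3 ≤ (PySem.List.pyGetD patients (slot.getD 2 0) []).length
instance (schedule : List (List Int)) (patients : List (List Int)) : Decidable (Pre_performance_eval schedule patients) := by unfold Pre_performance_eval; infer_instance

def pvWitness_performance_eval : List (List Int) × List (List Int) :=
  ([[1, 8, 0], [1, 9, 1], [2, 8, 0]], [[0, 2, 2], [0, 1, 3]])

def Spec_performance_eval (schedule : List (List Int)) (patients : List (List Int)) (out : List Int × List Int × List Int × List Int) : Prop := out = performance_eval_alt schedule patients
instance (schedule : List (List Int)) (patients : List (List Int)) (out : List Int × List Int × List Int × List Int) : Decidable (Spec_performance_eval schedule patients out) := by unfold Spec_performance_eval; infer_instance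

-- ===== CLAIM (what is proved, stated in full; the proofs are below) =====
def Claim_equal_performance_eval : Prop := ∀ (schedule : List (List Int)) (patients : List (List Int)), Dom_performance_eval schedule patients → Pre_performance_eval schedule patients → Spec_performance_eval schedule patients (performance_eval schedule patients)

-- ===== LEMMAS AND PROOFS =====

theorem pvSegments_cons_pos (x : List Int) {xs : List (List Int)}
    (hb : PySem.List.pyGetD x 1 0 = 8 ∧ PySem.List.pyGetD x 0 0 > 1)
    {sh : List (List Int)} {st : List (List (List Int))} (h : pvSegments xs = sh :: st) :
    pvSegments (x :: xs) = [] :: (x :: sh) :: st := by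
  simp only [pvSegments, h]
  rw [if_pos hb]

theorem pvSegments_cons_neg (x : List Int) {xs : List (List Int)}
    (hb : ¬(PySem.List.pyGetD x 1 0 = 8 ∧ PySem.List.pyGetD x 0 0 > 1))
    {sh : List (List Int)} {st : List (List (List Int))} (h : pvSegments xs = sh :: st) :
    pvSegments (x :: xs) = (x :: sh) :: st := by
  simp only [pvSegments, h]
  rw [if_neg hb]

theorem pvSegments_ne_nil (xs : List (List Int)) : pvSegments xs ≠ [] := by
  induction xs with
  | nil => simp [pvSegments]
  | cons x xs ih =>
    cases h : pvSegments xs with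
    | nil => exact absurd h ih
    | cons a b =>
      by_cases hb : PySem.List.pyGetD x 1 0 = 8 ∧ PySem.List.pyGetD x 0 0 > 1
      · rw [pvSegments_cons_pos x hb h]; simp
      · rw [pvSegments_cons_neg x hb h]; simp

-- generalized per-segment evaluation: first segment started from (curr, idle);
-- also returns the final clock state (curr, idle) of the last segment
def pvProcFrom (patients : List (List Int)) (curr idle : Int) :
    List (List (List Int)) → List Int × List Int × List Int × List Int × Int × Int
  | [] => ([], [], [], [], curr, idle)
  | [seg] =>
    let (lat, dw, c, i) := seg.foldl (pvStepSeg patients) ([], [], curr, idle)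
    (lat, dw, [], [], c, i)
  | seg :: rest =>
    let (lat, dw, c, i) := seg.foldl (pvStepSeg patients) ([], [], curr, idle)
    let (lat2, dw2, ot, it, c2, i2) := pvProcFrom patients 8 0 rest
    (lat ++ lat2, dw ++ dw2, max 0 (c - 17) :: ot, (i + max 0 (17 - c)) :: it, c2, i2)

-- foldl of pvStepSeg accumulates the lat/dw components as prefixes
theorem pvFoldSeg_acc (patients : List (List Int)) (seg : List (List Int))
    (lat dw : List Int) (c i : Int) :
    seg.foldl (pvStepSeg patients) (lat, dw, c, i) =
      (lat ++ (seg.foldl (pvStepSeg patients) ([], [], c, i)).1,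
       dw ++ (seg.foldl (pvStepSeg patients) ([], [], c, i)).2.1,
       (seg.foldl (pvStepSeg patients) ([], [], c, i)).2.2.1,
       (seg.foldl (pvStepSeg patients) ([], [], c, i)).2.2.2) := by
  induction seg generalizing lat dw c i with
  | nil => simp
  | cons x xs ih =>
    simp only [List.foldl_cons, pvStepSeg, List.nil_append]
    rw [ih]
    conv_rhs => rw [ih]
    simp [List.append_assoc]

-- unfolding pvProcFrom when the first segment is empty and another follows
theorem pvProcFrom_nil_cons (patients : List (List Int)) (c i : Int)
    (seg : List (List Int)) (t : List (List (List Int))) :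
    pvProcFrom patients c i ([] :: seg :: t) =
      ((pvProcFrom patients 8 0 (seg :: t)).1,
       (pvProcFrom patients 8 0 (seg :: t)).2.1,
       max 0 (c - 17) :: (pvProcFrom patients 8 0 (seg :: t)).2.2.1,
       (i + max 0 (17 - c)) :: (pvProcFrom patients 8 0 (seg :: t)).2.2.2.1,
       (pvProcFrom patients 8 0 (seg :: t)).2.2.2.2.1,
       (pvProcFrom patients 8 0 (seg :: t)).2.2.2.2.2) := by
  simp [pvProcFrom]

-- consuming the first slot of the first segment
theorem pvProcFrom_cons (patients : List (List Int)) (c i : Int)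
    (x : List Int) (h : List (List Int)) (t : List (List (List Int))) :
    pvProcFrom patients c i ((x :: h) :: t) =
      (let s := pvStepSeg patients ([], [], c, i) x
       let r := pvProcFrom patients s.2.2.1 s.2.2.2 (h :: t)
       (s.1 ++ r.1, s.2.1 ++ r.2.1, r.2.2.1, r.2.2.2.1, r.2.2.2.2.1, r.2.2.2.2.2)) := by
  cases t with
  | nil =>
    simp only [pvProcFrom, List.foldl_cons, pvStepSeg, List.nil_append]
    conv_lhs => rw [pvFoldSeg_acc]
  | cons t2 ts =>
    simp only [pvProcFrom, List.foldl_cons, pvStepSeg, List.nil_append]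
    conv_lhs => rw [pvFoldSeg_acc]
    simp

-- main invariant: A's fold over any suffix equals B's segmented evaluation of it
theorem pvMain (patients : List (List Int)) (xs : List (List Int)) :
    ∀ (c i : Int) (lat dw ot it : List Int),
    List.foldl (pvStepA patients) (lat, dw, ot, it, i, c) xs =
      (lat ++ (pvProcFrom patients c i (pvSegments xs)).1,
       dw ++ (pvProcFrom patients c i (pvSegments xs)).2.1,
       ot ++ (pvProcFrom patients c i (pvSegments xs)).2.2.1,
       it ++ (pvProcFrom patients c i (pvSegments xs)).2.2.2.1,
       (pvProcFrom patients c i (pvSegments xs)).2.2.2.2.2,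
       (pvProcFrom patients c i (pvSegments xs)).2.2.2.2.1) := by
  induction xs with
  | nil => intro c i lat dw ot it; simp [pvSegments, pvProcFrom]
  | cons x xs ih =>
    intro c i lat dw ot it
    cases h : pvSegments xs with
    | nil => exact absurd h (pvSegments_ne_nil xs)
    | cons sh st =>
      by_cases hb : PySem.List.pyGetD x 1 0 = 8 ∧ PySem.List.pyGetD x 0 0 > 1
      · rw [pvSegments_cons_pos x hb h]
        simp only [List.foldl_cons, pvStepA]
        rw [if_pos hb]
        rw [ih]
        rw [pvProcFrom_nil_cons, pvProcFrom_cons]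
        simp [pvStepSeg, hb.1, h, List.append_assoc]
      · rw [pvSegments_cons_neg x hb h]
        simp only [List.foldl_cons, pvStepA]
        rw [if_neg hb]
        rw [ih]
        rw [pvProcFrom_cons]
        simp [pvStepSeg, h, List.append_assoc]

theorem pvProcSegs_eq (patients : List (List Int)) (segs : List (List (List Int))) :
    pvProcSegs patients segs =
      ((pvProcFrom patients 8 0 segs).1, (pvProcFrom patients 8 0 segs).2.1,
       (pvProcFrom patients 8 0 segs).2.2.1, (pvProcFrom patients 8 0 segs).2.2.2.1) := by
  induction segs with
  | nil => simp [pvProcSegs, pvProcFrom]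
  | cons s rest ih =>
    cases rest with
    | nil => simp [pvProcSegs, pvProcFrom, pvEvalSeg]
    | cons s2 rs => simp [pvProcSegs, pvProcFrom, pvEvalSeg, ih]

-- ===== VERDICT (by name: the statement is the Claim_ definition above) =====
theorem performance_eval_spec : Claim_equal_performance_eval := by
  intro schedule patients _ _
  unfold Spec_performance_eval performance_eval performance_eval_alt
  rw [pvMain patients schedule 8 0 [] [] [] [], pvProcSegs_eq]
  simp
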